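-- pv_equiv track=rewrite | github.com/jiachengxiong/ConfSeq | unconditional_generation/src/utils/ConfSeq_3_2.py | replace_smiles_BE
-- ===== SOURCE A (Python) =====
-- def replace_smiles_BE(smiles_BE,token_idx_bond_idx_dic,atom_pairs,atom_pair_dihedrals_dic):
--
--     t_lis = []
--
--     for i in range(len(smiles_BE)):
--         if i in token_idx_bond_idx_dic:
--             bond_idx = token_idx_bond_idx_dic[i]
--             atom_pair = atom_pairs[bond_idx]
--             if atom_pair in atom_pair_dihedrals_dic:
--                 #t_lis.append(smiles_BE[i]) ######
--                 # if smiles_BE[i] in ['/','\\']: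
--                 #     t_lis.append('<'+smiles_BE[i]+str(int(atom_pair_dihedrals_dic[atom_pair])) + '>' )
--                 # else:
--                 #     t_lis.append('<'+ str(int(atom_pair_dihedrals_dic[atom_pair])) + '>' )
--                 t_lis.append('<'+ str(int(atom_pair_dihedrals_dic[atom_pair])) + '>' )
--             else:
--                 t_lis.append(smiles_BE[i])
--         else:
--             t_lis.append(smiles_BE[i])
--
--     return t_lis
-- ===== SOURCE B (Python) =====
-- def replace_smiles_BE(smiles_BE, token_idx_bond_idx_dic, atom_pairs, atom_pair_dihedrals_dic):
--     n = len(smiles_BE)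
--     replacements = {}
--     for i, bond_idx in token_idx_bond_idx_dic.items():
--         if 0 <= i < n:
--             atom_pair = atom_pairs[bond_idx]
--             if atom_pair in atom_pair_dihedrals_dic:
--                 replacements[i] = '<' + str(int(atom_pair_dihedrals_dic[atom_pair])) + '>'
--     return [replacements.get(i, smiles_BE[i]) for i in range(n)]
-- ===== Notes on version B (the rewrite author's own statement) =====
-- stated objective: alternative
-- what changed: Instead of testing dict membership and doing nested lookups inside one loop over the tokens, B first builds a replacement table in one pass over the annotation dict and then emits the output in a second, differently-shaped pass that just consults the table.
import Mathlib
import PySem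

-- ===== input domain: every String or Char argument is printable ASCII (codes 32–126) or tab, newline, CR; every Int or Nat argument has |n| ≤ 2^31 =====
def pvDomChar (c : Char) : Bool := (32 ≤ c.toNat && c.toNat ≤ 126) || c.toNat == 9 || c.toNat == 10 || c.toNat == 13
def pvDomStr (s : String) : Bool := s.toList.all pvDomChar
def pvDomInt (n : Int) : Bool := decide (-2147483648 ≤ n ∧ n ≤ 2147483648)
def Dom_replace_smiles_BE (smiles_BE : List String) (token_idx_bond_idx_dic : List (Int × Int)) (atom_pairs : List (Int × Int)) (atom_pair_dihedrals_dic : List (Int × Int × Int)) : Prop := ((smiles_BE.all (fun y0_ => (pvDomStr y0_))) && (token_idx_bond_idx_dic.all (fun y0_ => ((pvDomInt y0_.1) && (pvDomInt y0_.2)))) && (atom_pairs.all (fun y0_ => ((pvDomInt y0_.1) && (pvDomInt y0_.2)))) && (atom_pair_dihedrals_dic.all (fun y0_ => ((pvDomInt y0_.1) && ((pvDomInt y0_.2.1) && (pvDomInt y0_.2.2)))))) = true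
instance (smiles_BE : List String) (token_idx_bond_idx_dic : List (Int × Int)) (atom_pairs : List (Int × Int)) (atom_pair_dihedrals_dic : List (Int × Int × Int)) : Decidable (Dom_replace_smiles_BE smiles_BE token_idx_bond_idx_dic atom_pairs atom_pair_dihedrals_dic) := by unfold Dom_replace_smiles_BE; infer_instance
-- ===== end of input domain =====

-- B replaces A's single loop with inline nested lookups by a build-a-replacement-table pass
-- over the annotation dict followed by a table-consulting output pass (objective: alternative).


-- ===== PORT A =====
-- literal transliteration of A: one loop over range(len(smiles_BE)); the atom_pairs
-- IndexError case (pyGet? = none, excluded by Pre_) falls back to the token.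
def replace_smiles_BE (smiles_BE : List String) (token_idx_bond_idx_dic : List (Int × Int)) (atom_pairs : List (Int × Int)) (atom_pair_dihedrals_dic : List (Int × Int × Int)) : List String :=
  (PySem.List.pyRange 0 (smiles_BE.length : Int) 1).foldl (fun t_lis i =>
    match (PySem.Dict.mk token_idx_bond_idx_dic).get? i with
    | some bond_idx =>
      match PySem.List.pyGet? atom_pairs bond_idx with
      | some atom_pair =>
        match (PySem.Dict.mk (atom_pair_dihedrals_dic.map (fun q => ((q.1, q.2.1), q.2.2)))).get? atom_pair with
        | some v => t_lis ++ ["<" ++ PySem.Int.toStr v ++ ">"]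
        | none => t_lis ++ [PySem.List.pyGetD smiles_BE i ""]
      | none => t_lis ++ [PySem.List.pyGetD smiles_BE i ""]  -- IndexError in Python; outside Pre_
    | none => t_lis ++ [PySem.List.pyGetD smiles_BE i ""]) []

-- ===== PORT B =====
-- literal transliteration of B's table-building loop body (the if/nested lookups of Source B)
def pvBStep (n : Int) (atom_pairs : List (Int × Int)) (dd : PySem.Dict (Int × Int) Int)
    (r : PySem.Dict Int String) (p : Int × Int) : PySem.Dict Int String :=
  if 0 ≤ p.1 ∧ p.1 < n then
    match PySem.List.pyGet? atom_pairs p.2 with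
    | some atom_pair =>
      match dd.get? atom_pair with
      | some v => r.insert p.1 ("<" ++ PySem.Int.toStr v ++ ">")
      | none => r
    | none => r  -- IndexError in Python; outside Pre_
  else r

def replace_smiles_BE_alt (smiles_BE : List String) (token_idx_bond_idx_dic : List (Int × Int)) (atom_pairs : List (Int × Int)) (atom_pair_dihedrals_dic : List (Int × Int × Int)) : List String :=
  (PySem.List.pyRange 0 (smiles_BE.length : Int) 1).map (fun i =>
    (token_idx_bond_idx_dic.foldl
        (pvBStep (smiles_BE.length : Int) atom_pairs
          (PySem.Dict.mk (atom_pair_dihedrals_dic.map (fun q => ((q.1, q.2.1), q.2.2)))))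
        PySem.Dict.empty).getD i (PySem.List.pyGetD smiles_BE i ""))

-- ===== PRECONDITION & SPEC =====
-- Pre_ excludes (a) inputs where A raises IndexError (a bond index of an in-range token key
-- outside atom_pairs' index range), and (b) assoc-list encodings of token_idx_bond_idx_dic with
-- duplicate keys, which a Python dict cannot have: there first-match vs rebuilt-table value is an
-- accident of the encoding (both Pythons, fed an actual dict, agree).
def Pre_replace_smiles_BE (smiles_BE : List String) (token_idx_bond_idx_dic : List (Int × Int)) (atom_pairs : List (Int × Int)) (atom_pair_dihedrals_dic : List (Int × Int × Int)) : Prop :=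
  (token_idx_bond_idx_dic.map Prod.fst).Nodup ∧
  ∀ p ∈ token_idx_bond_idx_dic, 0 ≤ p.1 → p.1 < (smiles_BE.length : Int) →
    PySem.Raise.InRange atom_pairs.length p.2
instance (smiles_BE : List String) (token_idx_bond_idx_dic : List (Int × Int)) (atom_pairs : List (Int × Int)) (atom_pair_dihedrals_dic : List (Int × Int × Int)) : Decidable (Pre_replace_smiles_BE smiles_BE token_idx_bond_idx_dic atom_pairs atom_pair_dihedrals_dic) := by unfold Pre_replace_smiles_BE; infer_instance

def pvWitness_replace_smiles_BE : List String × (List (Int × Int)) × (List (Int × Int)) × (List (Int × Int × Int)) :=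
  (["C", "C", "O"], [(1, 0)], [(0, 1)], [(0, (1, 30))])

def Spec_replace_smiles_BE (smiles_BE : List String) (token_idx_bond_idx_dic : List (Int × Int)) (atom_pairs : List (Int × Int)) (atom_pair_dihedrals_dic : List (Int × Int × Int)) (out : List String) : Prop := out = replace_smiles_BE_alt smiles_BE token_idx_bond_idx_dic atom_pairs atom_pair_dihedrals_dic
instance (smiles_BE : List String) (token_idx_bond_idx_dic : List (Int × Int)) (atom_pairs : List (Int × Int)) (atom_pair_dihedrals_dic : List (Int × Int × Int)) (out : List String) : Decidable (Spec_replace_smiles_BE smiles_BE token_idx_bond_idx_dic atom_pairs atom_pair_dihedrals_dic out) := by unfold Spec_replace_smiles_BE; infer_instance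

-- ===== CLAIM (what is proved, stated in full; the proofs are below) =====
def Claim_equal_replace_smiles_BE : Prop := ∀ (smiles_BE : List String) (token_idx_bond_idx_dic : List (Int × Int)) (atom_pairs : List (Int × Int)) (atom_pair_dihedrals_dic : List (Int × Int × Int)), Dom_replace_smiles_BE smiles_BE token_idx_bond_idx_dic atom_pairs atom_pair_dihedrals_dic → Pre_replace_smiles_BE smiles_BE token_idx_bond_idx_dic atom_pairs atom_pair_dihedrals_dic → Spec_replace_smiles_BE smiles_BE token_idx_bond_idx_dic atom_pairs atom_pair_dihedrals_dic (replace_smiles_BE smiles_BE token_idx_bond_idx_dic atom_pairs atom_pair_dihedrals_dic)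

-- ===== LEMMAS AND PROOFS =====

-- what A appends for the index i (used only by the proofs)
def pvA (smiles_BE : List String) (d : PySem.Dict Int Int) (atom_pairs : List (Int × Int))
    (dd : PySem.Dict (Int × Int) Int) (i : Int) : String :=
  match d.get? i with
  | some bond_idx =>
    match PySem.List.pyGet? atom_pairs bond_idx with
    | some atom_pair =>
      match dd.get? atom_pair with
      | some v => "<" ++ PySem.Int.toStr v ++ ">"
      | none => PySem.List.pyGetD smiles_BE i ""
    | none => PySem.List.pyGetD smiles_BE i ""
  | none => PySem.List.pyGetD smiles_BE i ""

theorem pvA_foldl (smiles_BE : List String) (d : PySem.Dict Int Int) (ap : List (Int × Int))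
    (dd : PySem.Dict (Int × Int) Int) :
    ∀ (l : List Int) (acc : List String),
      l.foldl (fun t_lis i =>
        match d.get? i with
        | some bond_idx =>
          match PySem.List.pyGet? ap bond_idx with
          | some atom_pair =>
            match dd.get? atom_pair with
            | some v => t_lis ++ ["<" ++ PySem.Int.toStr v ++ ">"]
            | none => t_lis ++ [PySem.List.pyGetD smiles_BE i ""]
          | none => t_lis ++ [PySem.List.pyGetD smiles_BE i ""]
        | none => t_lis ++ [PySem.List.pyGetD smiles_BE i ""]) acc
      = acc ++ l.map (pvA smiles_BE d ap dd) := by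
  intro l
  induction l with
  | nil => intro acc; simp
  | cons i l ih =>
    intro acc
    rw [List.foldl_cons, List.map_cons, ih]
    have hstep : (match d.get? i with
        | some bond_idx =>
          match PySem.List.pyGet? ap bond_idx with
          | some atom_pair =>
            match dd.get? atom_pair with
            | some v => acc ++ ["<" ++ PySem.Int.toStr v ++ ">"]
            | none => acc ++ [PySem.List.pyGetD smiles_BE i ""]
          | none => acc ++ [PySem.List.pyGetD smiles_BE i ""]
        | none => acc ++ [PySem.List.pyGetD smiles_BE i ""])
        = acc ++ [pvA smiles_BE d ap dd i] := by
      rcases hgi : d.get? i with _ | b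
      · simp [pvA, hgi]
      · rcases hpg : PySem.List.pyGet? ap b with _ | a
        · simp [pvA, hgi, hpg]
        · rcases hdd : dd.get? a with _ | v <;> simp [pvA, hgi, hpg, hdd]
    rw [hstep]
    simp

-- the replacement option pvBStep decides on for an entry (i, b)
def pvRepl? (n : Int) (atom_pairs : List (Int × Int)) (dd : PySem.Dict (Int × Int) Int)
    (i b : Int) : Option String :=
  if 0 ≤ i ∧ i < n then
    match PySem.List.pyGet? atom_pairs b with
    | some atom_pair => (dd.get? atom_pair).map (fun v => "<" ++ PySem.Int.toStr v ++ ">")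
    | none => none
  else none

theorem pvBStep_eq (n : Int) (ap : List (Int × Int)) (dd : PySem.Dict (Int × Int) Int)
    (r : PySem.Dict Int String) (p : Int × Int) :
    pvBStep n ap dd r p =
      match pvRepl? n ap dd p.1 p.2 with
      | some s => r.insert p.1 s
      | none => r := by
  unfold pvBStep pvRepl?
  split_ifs with h
  · rcases hg : PySem.List.pyGet? ap p.2 with _ | a
    · simp
    · rcases hd : dd.get? a with _ | v <;> simp [hd]
  · rfl

-- lookup in the table built by folding pvBStep, for Nodup keys
theorem pv_get?_fold (n : Int) (ap : List (Int × Int)) (dd : PySem.Dict (Int × Int) Int) :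
    ∀ (dic : List (Int × Int)) (r : PySem.Dict Int String) (i : Int),
      (dic.map Prod.fst).Nodup →
      (dic.foldl (pvBStep n ap dd) r).get? i =
        match (PySem.Dict.mk dic).get? i with
        | some b => match pvRepl? n ap dd i b with
                    | some s => some s
                    | none => r.get? i
        | none => r.get? i := by
  intro dic
  induction dic with
  | nil => intro r i _; simp [PySem.Dict.get?]
  | cons p rest ih =>
    intro r i hnd
    obtain ⟨k, b⟩ := p
    simp only [List.map_cons, List.nodup_cons] at hnd
    obtain ⟨hk, hrest⟩ := hnd
    rw [List.foldl_cons, ih _ _ hrest, PySem.Dict.get?_mk_cons]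
    by_cases hik : k = i
    · subst hik
      have hnone : (PySem.Dict.mk rest).get? k = none := by
        rw [PySem.Dict.get?_eq_none_iff_not_mem_keys]
        simpa [PySem.Dict.keys, PySem.Dict.mk] using hk
      rw [hnone]
      simp only [beq_self_eq_true, if_pos]
      rw [pvBStep_eq]
      rcases hrep : pvRepl? n ap dd k b with _ | s
      · simp
      · simp [PySem.Dict.get?_insert_self]
    · have hbeq : (k == i) = false := by simp [hik]
      rw [hbeq]
      simp only [Bool.false_eq_true, if_neg, not_false_iff]
      have hstep : (pvBStep n ap dd r (k, b)).get? i = r.get? i := by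
        rw [pvBStep_eq]
        rcases pvRepl? n ap dd k b with _ | s
        · rfl
        · exact PySem.Dict.get?_insert_of_ne _ _ (fun h => hik h.symm)
      rcases (PySem.Dict.mk rest).get? i with _ | b' <;> simp only
      · exact hstep
      · rcases pvRepl? n ap dd i b' with _ | s <;> simp only
        exact hstep

-- ===== VERDICT (by name: the statement is the Claim_ definition above) =====
theorem replace_smiles_BE_spec : Claim_equal_replace_smiles_BE := by
  intro smiles dic ap dih _ hpre
  obtain ⟨hnd, hrange⟩ := hpre
  unfold Spec_replace_smiles_BE replace_smiles_BE replace_smiles_BE_alt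
  rw [pvA_foldl]
  rw [List.nil_append]
  apply List.map_congr_left
  intro i hi
  rw [PySem.List.mem_pyRange_one] at hi
  obtain ⟨h0, hn⟩ := hi
  rw [PySem.Dict.getD_eq_get?_getD,
      pv_get?_fold (smiles.length : Int) ap _ dic PySem.Dict.empty i hnd]
  unfold pvA
  rcases hd : (PySem.Dict.mk dic).get? i with _ | b
  · simp [PySem.Dict.get?_empty]
  · have hmem : (i, b) ∈ dic := by
      have := PySem.Dict.mem_items_of_get?_eq_some _ hd
      simpa [PySem.Dict.items] using this
    have hin : PySem.Raise.InRange ap.length b := hrange (i, b) hmem h0 hn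
    rcases hg : PySem.List.pyGet? ap b with _ | a
    · exact absurd (((PySem.List.pyGet?_eq_none_iff ap b).mp hg)) (by simpa using hin)
    · rcases hdd : (PySem.Dict.mk (dih.map (fun q => ((q.1, q.2.1), q.2.2)))).get? a with _ | v <;>
        simp [pvRepl?, h0, hn, hg, hdd, PySem.Dict.get?_empty]
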